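-- pv_equiv track=rewrite | github.com/PeterKADam/Bioinformatics | Project-Lars/Eksamensopgaver/2020/progexam.py | nr_unique_kmers_shared
-- ===== SOURCE A (Python) =====
-- def unique_kmers(seq, int):
--     list = []
--     for codon in range(0, len(seq) - int + 1):
--         if seq[codon : codon + int] not in list:
--             list.append(seq[codon : codon + int])
--     return list
--
-- def nr_unique_kmers_shared(seq1, seq2, int):
--
--     nr = 0
--
--     seq1kmers = unique_kmers(seq1, int)
--     seq2kmers = unique_kmers(seq2, int)
--
--     for kmer in seq1kmers:
--         if kmer in seq2kmers:
--             nr += 1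
--     return nr
-- ===== SOURCE B (Python) =====
-- def nr_unique_kmers_shared(seq1, seq2, int):
--     # sort the deduplicated k-mer lists, then count shared k-mers with a
--     # single two-pointer merge instead of membership probes
--     k1 = sorted(set(seq1[i : i + int] for i in range(0, len(seq1) - int + 1)))
--     k2 = sorted(set(seq2[i : i + int] for i in range(0, len(seq2) - int + 1)))
--     nr = 0
--     i = j = 0
--     while i < len(k1) and j < len(k2):
--         if k1[i] == k2[j]:
--             nr += 1
--             i += 1
--             j += 1
--         elif k1[i] < k2[j]:
--             i += 1
--         else:
--             j += 1
--     return nr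
-- ===== Notes on version B (the rewrite author's own statement) =====
-- stated objective: faster
-- what changed: Replaces A's quadratic list-membership dedup and nested membership scan by set-based dedup, sorting both unique k-mer lists and counting shared k-mers with a single two-pointer merge.
import Mathlib
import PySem

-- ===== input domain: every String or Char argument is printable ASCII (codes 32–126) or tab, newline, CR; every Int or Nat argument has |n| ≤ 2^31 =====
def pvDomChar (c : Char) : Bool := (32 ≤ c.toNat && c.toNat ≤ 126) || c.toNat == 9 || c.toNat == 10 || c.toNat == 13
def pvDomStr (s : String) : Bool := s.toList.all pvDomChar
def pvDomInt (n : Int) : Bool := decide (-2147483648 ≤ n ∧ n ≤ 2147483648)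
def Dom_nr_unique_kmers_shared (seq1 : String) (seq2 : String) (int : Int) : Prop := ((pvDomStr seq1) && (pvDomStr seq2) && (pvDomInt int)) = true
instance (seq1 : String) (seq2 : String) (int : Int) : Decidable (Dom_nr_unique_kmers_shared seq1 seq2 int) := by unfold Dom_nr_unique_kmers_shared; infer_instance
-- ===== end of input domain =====

-- B sorts the deduplicated k-mer lists and counts shared k-mers with a two-pointer merge
-- instead of A's list-membership dedup and nested membership scan (objective: faster).

-- ===== PORT A =====
-- unique_kmers(seq, int): ordered dedup of the k-mer slices via 'not in list' probes
def unique_kmers (seq : String) (int : Int) : List String :=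
  (PySem.List.pyRange 0 (PySem.Str.len seq - int + 1) 1).foldl
    (fun acc codon =>
      if PySem.Str.slice seq (some codon) (some (codon + int)) ∈ acc then acc
      else acc ++ [PySem.Str.slice seq (some codon) (some (codon + int))]) []

def nr_unique_kmers_shared (seq1 : String) (seq2 : String) (int : Int) : Int :=
  let seq1kmers := unique_kmers seq1 int
  let seq2kmers := unique_kmers seq2 int
  seq1kmers.foldl (fun nr kmer => if kmer ∈ seq2kmers then nr + 1 else nr) 0

-- ===== PORT B =====
-- sorted(set(seq[i:i+int] for i in range(0, len(seq)-int+1)))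
def sortedKmers (seq : String) (int : Int) : List String :=
  PySem.List.sorted
    (PySem.Set.ofList
      ((PySem.List.pyRange 0 (PySem.Str.len seq - int + 1) 1).map
        (fun i => PySem.Str.slice seq (some i) (some (i + int)))))
    (fun x => x) false

-- the two-pointer merge loop of Source B, as structural recursion on the two lists
def mergeCount : List String → List String → Int
  | [], _ => 0
  | _ :: _, [] => 0
  | x :: xs, y :: ys =>
    if x = y then 1 + mergeCount xs ys
    else if x < y then mergeCount xs (y :: ys)
    else mergeCount (x :: xs) ys

def nr_unique_kmers_shared_alt (seq1 : String) (seq2 : String) (int : Int) : Int :=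
  mergeCount (sortedKmers seq1 int) (sortedKmers seq2 int)

-- ===== PRECONDITION & SPEC =====
def Spec_nr_unique_kmers_shared (seq1 : String) (seq2 : String) (int : Int) (out : Int) : Prop := out = nr_unique_kmers_shared_alt seq1 seq2 int
instance (seq1 : String) (seq2 : String) (int : Int) (out : Int) : Decidable (Spec_nr_unique_kmers_shared seq1 seq2 int out) := by unfold Spec_nr_unique_kmers_shared; infer_instance

-- ===== CLAIM (what is proved, stated in full; the proofs are below) =====
def Claim_equal_nr_unique_kmers_shared : Prop := ∀ (seq1 : String) (seq2 : String) (int : Int), Dom_nr_unique_kmers_shared seq1 seq2 int → Spec_nr_unique_kmers_shared seq1 seq2 int (nr_unique_kmers_shared seq1 seq2 int)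

-- ===== LEMMAS AND PROOFS =====

-- the raw k-mer list both programs slice out
def kmerList (seq : String) (int : Int) : List String :=
  (PySem.List.pyRange 0 (PySem.Str.len seq - int + 1) 1).map
    (fun i => PySem.Str.slice seq (some i) (some (i + int)))

-- A's 'not in' dedup loop is exactly set(...) of the k-mer list
theorem unique_kmers_eq_ofList (seq : String) (int : Int) :
    unique_kmers seq int = PySem.Set.ofList (kmerList seq int) := by
  unfold unique_kmers kmerList
  rw [PySem.Set.ofList_eq_foldl, List.foldl_map]
  have hfun : (PySem.Set.add : PySem.Set String → String → PySem.Set String)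
      = fun acc x => if x ∈ acc then acc else acc ++ [x] := by
    funext acc x
    by_cases h : x ∈ acc <;>
      simp [PySem.Set.add, PySem.Set.contains, h]
  rw [hfun]

-- the merge of two strictly increasing lists counts the left elements present on the right
theorem mergeCount_eq_countP (xs ys : List String)
    (hx : xs.Pairwise (· < ·)) (hy : ys.Pairwise (· < ·)) :
    mergeCount xs ys = (xs.countP (fun k => decide (k ∈ ys)) : Int) := by
  fun_induction mergeCount xs ys with
  | case1 ys => simp
  | case2 x xs => simp
  | case3 xs y ys ih =>
    rw [List.pairwise_cons] at hx hy
    rw [ih hx.2 hy.2]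
    have hcg : xs.countP (fun k => decide (k ∈ y :: ys)) = xs.countP (fun k => decide (k ∈ ys)) := by
      refine List.countP_congr (fun z hz => ?_)
      have : y < z := hx.1 z hz
      simp only [decide_eq_true_eq, List.mem_cons]
      constructor
      · rintro (rfl | h)
        · exact absurd this (lt_irrefl z)
        · exact h
      · exact Or.inr
    rw [List.countP_cons, hcg]
    simp
    omega
  | case4 x xs y ys hne hlt ih =>
    rw [List.pairwise_cons] at hx
    rw [ih hx.2 hy]
    have hnot : x ∉ y :: ys := by
      rw [List.pairwise_cons] at hy
      simp only [List.mem_cons]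
      rintro (rfl | h)
      · exact hne rfl
      · exact absurd hlt (not_lt.2 (le_of_lt (hy.1 x h)))
    rw [List.countP_cons]
    simp [hnot]
  | case5 x xs y ys hne hnlt ih =>
    rw [List.pairwise_cons] at hy
    rw [ih hx hy.2]
    have hxy : y < x := lt_of_le_of_ne (not_lt.1 hnlt) (fun h => hne h.symm)
    have hcg : (x :: xs).countP (fun k => decide (k ∈ y :: ys))
        = (x :: xs).countP (fun k => decide (k ∈ ys)) := by
      refine List.countP_congr (fun z hz => ?_)
      rw [List.pairwise_cons] at hx
      have hyz : y < z := by
        rcases List.mem_cons.1 hz with rfl | h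
        · exact hxy
        · exact lt_trans hxy (hx.1 z h)
      simp only [decide_eq_true_eq, List.mem_cons]
      constructor
      · rintro (rfl | h)
        · exact absurd hyz (lt_irrefl z)
        · exact h
      · exact Or.inr
    rw [hcg]

theorem nr_unique_kmers_shared_eq (seq1 seq2 : String) (int : Int) :
    nr_unique_kmers_shared seq1 seq2 int = nr_unique_kmers_shared_alt seq1 seq2 int := by
  have h1 := unique_kmers_eq_ofList seq1 int
  have h2 := unique_kmers_eq_ofList seq2 int
  have hS : ∀ s i, sortedKmers s i
      = PySem.List.sorted (PySem.Set.ofList (kmerList s i)) (fun x => x) false := fun s i => rfl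
  show (unique_kmers seq1 int).foldl
      (fun nr kmer => if kmer ∈ unique_kmers seq2 int then nr + 1 else nr) 0
    = mergeCount (sortedKmers seq1 int) (sortedKmers seq2 int)
  rw [h1, h2,
    PySem.List.foldl_ite_add_one (fun kmer => kmer ∈ PySem.Set.ofList (kmerList seq2 int)),
    mergeCount_eq_countP _ _
      (by rw [hS]; exact PySem.List.sorted_ofList_pairwise_lt _)
      (by rw [hS]; exact PySem.List.sorted_ofList_pairwise_lt _)]
  have hperm1 : (sortedKmers seq1 int).Perm (PySem.Set.ofList (kmerList seq1 int)) := by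
    rw [hS]; exact PySem.List.sorted_perm _ _ _
  have hpred : (sortedKmers seq1 int).countP (fun k => decide (k ∈ sortedKmers seq2 int))
      = (sortedKmers seq1 int).countP
          (fun k => decide (k ∈ PySem.Set.ofList (kmerList seq2 int))) :=
    List.countP_congr (fun z _ => by
      simp only [decide_eq_true_eq]
      rw [hS, PySem.List.mem_sorted])
  rw [hpred, hperm1.countP_eq]
  simp

-- ===== VERDICT (by name: the statement is the Claim_ definition above) =====
theorem nr_unique_kmers_shared_spec : Claim_equal_nr_unique_kmers_shared := by
  intro seq1 seq2 int _
  exact nr_unique_kmers_shared_eq seq1 seq2 int
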